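-- pv_equiv track=rewrite | github.com/PatrickUrsi/Atividades-Faculdade-Impacta- | Programação Orientada a Objetos Python/Atividade Contínua 01.py | eh_quase_armstrong
-- ===== SOURCE A (Python) =====
-- def eh_armstrong(n):
-- 	s = str(n)
-- 	cont = 0
-- 	acumulador = 0
-- 	while cont <= len(s)-1:
-- 		a = int(s[cont])
-- 		acumulador += a**len(s)
-- 		cont += 1
-- 	if acumulador == n:
-- 		return True
-- 	return False
--
-- def eh_quase_armstrong(n):
-- 	if eh_armstrong(n) == True:
-- 		return False
-- 	s = str(n)
-- 	cont = 0
-- 	acumulador = 0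
-- 	while cont <= len(s)-1:
-- 		a = int(s[cont])
-- 		acumulador += a**len(s)
-- 		cont += 1
-- 	if acumulador +1 == n:
-- 		return True
-- 	return False
-- ===== SOURCE B (Python) =====
-- def eh_quase_armstrong(n):
-- 	k = 0
-- 	m = n
-- 	while m > 0:
-- 		m //= 10
-- 		k += 1
-- 	total = 0
-- 	m = n
-- 	while m > 0:
-- 		total += (m % 10) ** k
-- 		m //= 10
-- 	return total + 1 == n
-- ===== Notes on version B (the rewrite author's own statement) =====
-- stated objective: alternative
-- what changed: B never converts n to a string: it extracts digits arithmetically with integer division and remainder (one loop to count digits, one to accumulate digit powers) and tests whether the digit-power sum is exactly one less than n, dropping A's eh_armstrong string-scanning helper and its duplicated second string scan (the Armstrong pre-check is redundant: a near-miss by one can never itself be an Armstrong number).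
import Mathlib
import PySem

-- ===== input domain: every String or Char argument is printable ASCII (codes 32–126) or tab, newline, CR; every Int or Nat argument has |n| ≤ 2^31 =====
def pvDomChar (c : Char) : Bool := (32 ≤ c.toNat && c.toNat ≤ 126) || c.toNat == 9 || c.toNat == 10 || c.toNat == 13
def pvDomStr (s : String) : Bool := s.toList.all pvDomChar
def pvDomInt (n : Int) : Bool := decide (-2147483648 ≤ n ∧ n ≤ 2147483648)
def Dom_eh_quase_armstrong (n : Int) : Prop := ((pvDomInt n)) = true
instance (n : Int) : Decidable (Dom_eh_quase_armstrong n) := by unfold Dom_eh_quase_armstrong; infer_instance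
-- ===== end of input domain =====

-- B extracts digits arithmetically with integer division and remainder (no str(n) conversion) and tests
-- whether the digit-power sum is one less than n; A's string-scanning Armstrong pre-check is redundant.


-- ===== PORT A =====
-- digit-power-sum loop of A ('while cont <= len(s)-1: a = int(s[cont]); acumulador += a**len(s)');
-- the accumulator is Option Int: none = the ValueError int(s[cont]) raises (only for negative n)
def pvDigitLoop (s : List Char) (k : Nat) : Option Int :=
  (PySem.List.pyRange 0 (PySem.List.len s) 1).foldl
    (fun acc cont => acc.bind fun ac =>
      (PySem.Int.ofChars? [PySem.List.pyGetD s cont ' ']).map fun a => ac + a ^ k)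
    (some 0)

def eh_armstrong (n : Int) : Bool :=
  let s := PySem.Int.toChars n
  match pvDigitLoop s s.length with
  | some ac => decide (ac = n)
  | none => false   -- Python raises ValueError here; excluded by Pre_

def eh_quase_armstrong (n : Int) : Bool :=
  if eh_armstrong n = true then false
  else
    let s := PySem.Int.toChars n
    match pvDigitLoop s s.length with
    | some ac => decide (ac + 1 = n)
    | none => false   -- Python raises ValueError here; excluded by Pre_

-- ===== PORT B =====
-- 'k = 0; m = n; while m > 0: m //= 10; k += 1'
def pvCountDigits (m : Int) (k : Nat) : Nat :=
  if h : 0 < m then pvCountDigits (PySem.Int.floordiv m 10) (k + 1) else k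
termination_by m.toNat
decreasing_by
  rw [PySem.Int.floordiv_eq_ediv_of_pos (by norm_num : (0:Int) < 10)]
  omega

-- 'total = 0; m = n; while m > 0: total += (m % 10) ** k; m //= 10'
def pvSumPows (m total : Int) (k : Nat) : Int :=
  if _h : 0 < m then
    pvSumPows (PySem.Int.floordiv m 10) (total + (PySem.Int.mod m 10) ^ k) k
  else total
termination_by m.toNat
decreasing_by
  rw [PySem.Int.floordiv_eq_ediv_of_pos (by norm_num : (0:Int) < 10)]
  omega

def eh_quase_armstrong_alt (n : Int) : Bool :=
  let k := pvCountDigits n 0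
  let total := pvSumPows n 0 k
  decide (total + 1 = n)

-- ===== PRECONDITION & SPEC =====
-- Pre_ excludes negative inputs, where the minus sign in str(n) makes int() raise ValueError in A.
def Pre_eh_quase_armstrong (n : Int) : Prop := 0 ≤ n
instance (n : Int) : Decidable (Pre_eh_quase_armstrong n) := by unfold Pre_eh_quase_armstrong; infer_instance
def pvWitness_eh_quase_armstrong : Int := 35

def Spec_eh_quase_armstrong (n : Int) (out : Bool) : Prop := out = eh_quase_armstrong_alt n
instance (n : Int) (out : Bool) : Decidable (Spec_eh_quase_armstrong n out) := by unfold Spec_eh_quase_armstrong; infer_instance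

-- ===== CLAIM (what is proved, stated in full; the proofs are below) =====
def Claim_equal_eh_quase_armstrong : Prop := ∀ (n : Int), Dom_eh_quase_armstrong n → Pre_eh_quase_armstrong n → Spec_eh_quase_armstrong n (eh_quase_armstrong n)

-- ===== LEMMAS AND PROOFS =====

-- the decimal digit characters of m, most significant first (reference form of Nat.toDigits 10)
def natDigChars (m : Nat) : List Char :=
  if m < 10 then [Nat.digitChar m]
  else natDigChars (m / 10) ++ [Nat.digitChar (m % 10)]
termination_by m
decreasing_by exact Nat.div_lt_self (by omega) (by norm_num)

-- the digit-power sum, digits taken arithmetically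
def dsum (m k : Nat) : Int :=
  if m < 10 then (m : Int) ^ k
  else dsum (m / 10) k + ((m % 10 : Nat) : Int) ^ k
termination_by m
decreasing_by exact Nat.div_lt_self (by omega) (by norm_num)

lemma toDigitsCore_eq : ∀ (f m : Nat) (ds : List Char), m < f →
    Nat.toDigitsCore 10 f m ds = natDigChars m ++ ds := by
  intro f
  induction f with
  | zero => intro m ds h; omega
  | succ f ih =>
    intro m ds h
    rw [Nat.toDigitsCore]
    by_cases h10 : m / 10 = 0
    · have hm : m < 10 := by omega
      rw [if_pos h10, natDigChars, if_pos hm, Nat.mod_eq_of_lt hm]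
      simp
    · have hm : ¬ m < 10 := by omega
      have hlt : m / 10 < f := by
        have := Nat.div_lt_self (show 0 < m by omega) (show 1 < 10 by norm_num)
        omega
      rw [if_neg h10, ih (m / 10) _ hlt]
      conv_rhs => rw [natDigChars]
      rw [if_neg hm]
      simp

lemma toDigits_eq (m : Nat) : Nat.toDigits 10 m = natDigChars m := by
  rw [Nat.toDigits, toDigitsCore_eq (m + 1) m [] (Nat.lt_succ_self m)]
  simp

lemma ofChars?_digitChar (d : Nat) (hd : d < 10) :
    PySem.Int.ofChars? [Nat.digitChar d] = some (d : Int) := by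
  interval_cases d <;> decide

lemma foldl_natDigChars (k : Nat) : ∀ (m : Nat), 0 < m → ∀ (t : Int),
    List.foldl
      (fun acc c => acc.bind fun ac => (PySem.Int.ofChars? [c]).map fun a => ac + a ^ k)
      (some t) (natDigChars m) = some (t + dsum m k) := by
  intro m
  induction m using Nat.strong_induction_on with
  | _ m ih =>
    intro hm t
    rw [natDigChars, dsum]
    by_cases h10 : m < 10
    · rw [if_pos h10, if_pos h10]
      simp [ofChars?_digitChar m h10]
    · rw [if_neg h10, if_neg h10, List.foldl_append]
      have hq : 0 < m / 10 := Nat.div_pos (by omega) (by norm_num)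
      have hlt : m / 10 < m := Nat.div_lt_self (by omega) (by norm_num)
      rw [ih (m / 10) hlt hq t]
      simp [ofChars?_digitChar (m % 10) (Nat.mod_lt m (by norm_num)), add_assoc]

lemma pvCountDigits_eq : ∀ (m : Nat), 0 < m → ∀ (a : Nat),
    pvCountDigits (m : Int) a = (natDigChars m).length + a := by
  intro m
  induction m using Nat.strong_induction_on with
  | _ m ih =>
    intro hm a
    rw [pvCountDigits, dif_pos (by exact_mod_cast hm), natDigChars]
    rw [show PySem.Int.floordiv (m : Int) 10 = ((m / 10 : Nat) : Int) from
      PySem.Int.floordiv_natCast m 10]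
    by_cases h10 : m < 10
    · have : m / 10 = 0 := Nat.div_eq_of_lt h10
      rw [this, if_pos h10, pvCountDigits]
      simp
      omega
    · have hq : 0 < m / 10 := Nat.div_pos (by omega) (by norm_num)
      have hlt : m / 10 < m := Nat.div_lt_self (by omega) (by norm_num)
      rw [ih (m / 10) hlt hq (a + 1), if_neg h10]
      simp; omega

lemma pvSumPows_eq (k : Nat) : ∀ (m : Nat), 0 < m → ∀ (t : Int),
    pvSumPows (m : Int) t k = t + dsum m k := by
  intro m
  induction m using Nat.strong_induction_on with
  | _ m ih =>
    intro hm t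
    rw [pvSumPows, dif_pos (by exact_mod_cast hm), dsum]
    rw [show PySem.Int.floordiv (m : Int) 10 = ((m / 10 : Nat) : Int) from
      PySem.Int.floordiv_natCast m 10]
    rw [show PySem.Int.mod (m : Int) 10 = ((m % 10 : Nat) : Int) from
      PySem.Int.mod_natCast m 10]
    by_cases h10 : m < 10
    · have : m / 10 = 0 := Nat.div_eq_of_lt h10
      rw [this, if_pos h10, pvSumPows]
      have : m % 10 = m := Nat.mod_eq_of_lt h10
      rw [this]
      norm_num
    · have hq : 0 < m / 10 := Nat.div_pos (by omega) (by norm_num)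
      have hlt : m / 10 < m := Nat.div_lt_self (by omega) (by norm_num)
      rw [ih (m / 10) hlt hq, if_neg h10]
      ring

-- A's index-driven loop computes the same Option value as a fold over the characters
lemma pvDigitLoop_eq_foldl (s : List Char) (k : Nat) :
    pvDigitLoop s k =
      s.foldl (fun acc c => acc.bind fun ac =>
        (PySem.Int.ofChars? [c]).map fun a => ac + a ^ k) (some 0) := by
  unfold pvDigitLoop
  exact PySem.List.foldl_pyRange_zero_pyGetD s ' '
    (fun acc c => acc.bind fun ac => (PySem.Int.ofChars? [c]).map fun a => ac + a ^ k)
    (some 0)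

lemma toChars_natCast (m : Nat) : PySem.Int.toChars (m : Int) = natDigChars m := by
  simp [PySem.Int.toChars, toDigits_eq]

-- ===== VERDICT (by name: the statement is the Claim_ definition above) =====
theorem eh_quase_armstrong_spec : Claim_equal_eh_quase_armstrong := by
  intro n _ hpre
  show eh_quase_armstrong n = eh_quase_armstrong_alt n
  lift n to ℕ using hpre with m
  have hB0 : ∀ (z : Int), ¬ 0 < z → eh_quase_armstrong_alt z = decide ((0:Int) + 1 = z) := by
    intro z hz
    show decide (pvSumPows z 0 (pvCountDigits z 0) + 1 = z) = _
    rw [pvCountDigits, dif_neg hz]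
    rw [pvSumPows.eq_def, dif_neg hz]
  by_cases hm : m = 0
  · subst hm
    simp only [Nat.cast_zero]
    rw [hB0 0 (by omega)]
    decide
  · have hm' : 0 < m := Nat.pos_of_ne_zero hm
    set k := (natDigChars m).length with hk
    have hA : pvDigitLoop (PySem.Int.toChars (m : Int))
        (PySem.Int.toChars (m : Int)).length = some (dsum m k) := by
      rw [toChars_natCast, pvDigitLoop_eq_foldl, foldl_natDigChars k m hm' 0, zero_add]
    have hB : eh_quase_armstrong_alt (m : Int) = decide (dsum m k + 1 = (m : Int)) := by
      show decide (pvSumPows (m : Int) 0 (pvCountDigits (m : Int) 0) + 1 = (m : Int)) = _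
      rw [pvCountDigits_eq m hm' 0, Nat.add_zero, ← hk, pvSumPows_eq k m hm' 0, zero_add]
    have hA' : eh_armstrong (m : Int) = decide (dsum m k = (m : Int)) := by
      show (match pvDigitLoop (PySem.Int.toChars (m : Int))
              (PySem.Int.toChars (m : Int)).length with
            | some ac => decide (ac = (m : Int)) | none => false) = _
      rw [hA]
    have hsplit : eh_quase_armstrong (m : Int) =
        if eh_armstrong (m : Int) = true then false
        else decide (dsum m k + 1 = (m : Int)) := by
      show (if eh_armstrong (m : Int) = true then false
            else match pvDigitLoop (PySem.Int.toChars (m : Int))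
                   (PySem.Int.toChars (m : Int)).length with
                 | some ac => decide (ac + 1 = (m : Int)) | none => false) = _
      rw [hA]
    rw [hsplit, hB, hA']
    by_cases hd : dsum m k = (m : Int)
    · simp only [hd, decide_true]
      have : ¬ ((m : Int) + 1 = (m : Int)) := by omega
      simp [this]
    · simp [hd]
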